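-- pv_equiv track=rewrite | github.com/pypi-data/pypi-mirror-199 | packages/PyAlchemista/PyAlchemista-0.0.6.tar.gz/PyAlchemista-0.0.6/Disciplina/main.py | isMathematicalFunction
-- ===== SOURCE A (Python) =====
-- def isMathematicalFunction(mapping):
--     """
--     Determines whether the given dictionary of sets represents a mathematical function.
--
--     Args:
--         mapping: A dictionary of sets representing the function.
--
--     Returns:
--         True if the mapping represents a function, False otherwise.
--     """
--     # Check if the mapping is empty
--     if not mapping:
--         return False
--
--     # Check if every key maps to a single value
--     for key in mapping:
--         if len(mapping[key]) != 1:
--             return False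
--
--     # Check if multiple keys map to the same value
--     values = set()
--     for key in mapping:
--         value = tuple(mapping[key])[0]
--         if value in values:
--             return False
--         values.add(value)
--
--     # If we made it here, the mapping represents a function
--     return True
-- ===== SOURCE B (Python) =====
-- def isMathematicalFunction(mapping):
--     # One combined recursive pass, no seen-set accumulator: a mapping is a
--     # function iff it is nonempty, each head set is a singleton, and the head's
--     # value does not occur in any remaining set; recurse on the remainder.
--     def _ok(items):
--         if not items:
--             return True
--         (_, s), rest = items[0], items[1:]
--         if len(s) != 1:
--             return False
--         (v,) = s
--         if any(v in s2 for _, s2 in rest):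
--             return False
--         return _ok(rest)
--     items = list(mapping.items())
--     return bool(items) and _ok(items)
-- ===== Notes on version B (the rewrite author's own statement) =====
-- stated objective: alternative
-- what changed: Replaces A's two staged loops (a whole-dict size scan, then a second scan maintaining an incremental seen-set) with a single accumulator-free structural recursion that checks the head set is a singleton and that its value occurs in no remaining set, then recurses on the tail; trades the O(n) seen-set pass for a quadratic head-vs-rest membership scan.
import Mathlib
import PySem

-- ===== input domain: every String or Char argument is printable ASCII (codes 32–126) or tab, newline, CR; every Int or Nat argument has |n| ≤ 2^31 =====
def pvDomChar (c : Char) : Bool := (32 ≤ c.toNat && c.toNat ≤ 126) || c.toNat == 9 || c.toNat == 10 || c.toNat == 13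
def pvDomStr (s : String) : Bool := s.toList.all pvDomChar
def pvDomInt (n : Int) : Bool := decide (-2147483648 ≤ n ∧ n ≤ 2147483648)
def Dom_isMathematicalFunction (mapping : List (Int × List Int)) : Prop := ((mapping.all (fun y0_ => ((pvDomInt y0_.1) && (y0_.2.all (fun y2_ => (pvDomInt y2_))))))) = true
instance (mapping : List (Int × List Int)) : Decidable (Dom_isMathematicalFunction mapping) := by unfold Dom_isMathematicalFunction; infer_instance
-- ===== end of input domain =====

-- B replaces A's two staged loops (size scan, then an incremental seen-set loop) with one
-- accumulator-free structural recursion comparing each head against the remainder: alternative decomposition.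


-- ===== PORT A =====
-- second loop of A: values = set(); for key: value = tuple(mapping[key])[0]; membership test, else add.
-- (each value list models a Python set; after A's first loop it is a singleton, so tuple(s)[0] is its head)
def pvALoop2 (rest : List (Int × List Int)) (values : PySem.Set Int) : Bool :=
  match rest with
  | [] => true
  | (_, v) :: rs =>
    let value := v.headD 0
    if PySem.Set.contains values value then false
    else pvALoop2 rs (PySem.Set.add values value)

-- first loop of A: for key: if len(mapping[key]) != 1: return False; then fall through to the second loop.
def pvALoop1 (rest : List (Int × List Int)) (all : List (Int × List Int)) : Bool :=
  match rest with
  | [] => pvALoop2 all PySem.Set.empty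
  | (_, v) :: rs => if v.length ≠ 1 then false else pvALoop1 rs all

def isMathematicalFunction (mapping : List (Int × List Int)) : Bool :=
  if mapping.isEmpty then false
  else pvALoop1 mapping mapping

-- ===== PORT B =====
-- B's inner _ok: head set must be a singleton {v}, v must occur in no remaining set, recurse on rest.
def pvBOk (items : List (Int × List Int)) : Bool :=
  match items with
  | [] => true
  | (_, s) :: rest =>
    if s.length ≠ 1 then false
    else
      let v := s.headD 0
      if rest.any (fun kv => kv.2.contains v) then false
      else pvBOk rest

def isMathematicalFunction_alt (mapping : List (Int × List Int)) : Bool :=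
  !mapping.isEmpty && pvBOk mapping

-- ===== PRECONDITION & SPEC =====
def Spec_isMathematicalFunction (mapping : List (Int × List Int)) (out : Bool) : Prop := out = isMathematicalFunction_alt mapping
instance (mapping : List (Int × List Int)) (out : Bool) : Decidable (Spec_isMathematicalFunction mapping out) := by unfold Spec_isMathematicalFunction; infer_instance

-- ===== CLAIM (what is proved, stated in full; the proofs are below) =====
def Claim_equal_isMathematicalFunction : Prop := ∀ (mapping : List (Int × List Int)), Dom_isMathematicalFunction mapping → Spec_isMathematicalFunction mapping (isMathematicalFunction mapping)

-- ===== LEMMAS AND PROOFS =====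

-- a list of length 1 is the singleton of its head
lemma eq_singleton_of_length_one (l : List Int) (h : l.length = 1) : l = [l.headD 0] := by
  cases l with
  | nil => simp at h
  | cons a t => cases t with
    | nil => rfl
    | cons b u => simp at h

-- A's seen-set loop succeeds iff the mapped values are nodup and avoid the accumulator
lemma pvALoop2_iff (l : List (Int × List Int)) (values : PySem.Set Int) :
    pvALoop2 l values = true ↔
      (l.map (fun kv => kv.2.headD 0)).Nodup ∧ ∀ x ∈ l.map (fun kv => kv.2.headD 0), x ∉ values := by
  induction l generalizing values with
  | nil => simp [pvALoop2]
  | cons kv rs ih =>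
    obtain ⟨k, v⟩ := kv
    by_cases hmem : v.headD 0 ∈ values
    · have hc : PySem.Set.contains values (v.headD 0) = true := (PySem.Set.contains_iff _ _).2 hmem
      simp only [pvALoop2, hc, if_true, List.map_cons, List.nodup_cons, List.mem_cons]
      constructor
      · intro h; cases h
      · rintro ⟨-, hall⟩
        exact absurd hmem (hall _ (Or.inl rfl))
    · have hc : PySem.Set.contains values (v.headD 0) = false := by
        simpa using fun h => hmem ((PySem.Set.contains_iff _ _).1 h)
      simp only [pvALoop2, hc, Bool.false_eq_true, if_false, ih, List.map_cons,
        List.nodup_cons, List.mem_cons, PySem.Set.mem_add]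
      constructor
      · rintro ⟨hnd, hall⟩
        refine ⟨⟨fun hm => hall _ hm (Or.inr rfl), hnd⟩, ?_⟩
        rintro x (rfl | hx)
        · exact hmem
        · exact fun hv => hall _ hx (Or.inl hv)
      · rintro ⟨⟨hnm, hnd⟩, hall⟩
        refine ⟨hnd, fun x hx => ?_⟩
        rintro (hv | rfl)
        · exact hall _ (Or.inr hx) hv
        · exact hnm hx

-- A's first loop = "all sets singletons", falling through to the second loop
lemma pvALoop1_iff (rest all : List (Int × List Int)) :
    pvALoop1 rest all = true ↔
      (∀ kv ∈ rest, kv.2.length = 1) ∧ pvALoop2 all PySem.Set.empty = true := by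
  induction rest with
  | nil => simp [pvALoop1]
  | cons kv rs ih =>
    obtain ⟨k, v⟩ := kv
    by_cases h : v.length = 1
    · simp [pvALoop1, h, ih]
    · simp [pvALoop1, h]

-- B's recursion succeeds iff all sets are singletons and their heads are nodup
lemma pvBOk_iff (l : List (Int × List Int)) :
    pvBOk l = true ↔
      (∀ kv ∈ l, kv.2.length = 1) ∧ (l.map (fun kv => kv.2.headD 0)).Nodup := by
  induction l with
  | nil => simp [pvBOk]
  | cons kv rs ih =>
    obtain ⟨k, v⟩ := kv
    by_cases h : v.length = 1
    · simp only [pvBOk, h, ne_eq, not_true_eq_false, if_false, List.map_cons,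
        List.nodup_cons, List.mem_cons]
      cases hany : rs.any (fun kv => kv.2.contains (v.headD 0)) with
      | true =>
        simp only [if_true]
        rw [List.any_eq_true] at hany
        obtain ⟨kv2, hkv2, hc⟩ := hany
        rw [List.contains_iff_mem] at hc
        constructor
        · intro hf; cases hf
        · rintro ⟨hall, hnm, -⟩
          have h2 := hall kv2 (Or.inr hkv2)
          have := eq_singleton_of_length_one kv2.2 h2
          rw [this] at hc
          rw [List.mem_singleton] at hc
          exact (hnm (List.mem_map.mpr ⟨kv2, hkv2, hc.symm⟩)).elim
      | false =>
        simp only [Bool.false_eq_true, if_false, ih]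
        rw [List.any_eq_false] at hany
        constructor
        · rintro ⟨hall, hnd⟩
          refine ⟨fun kv' hm => by rcases hm with rfl | hm; exact h; exact hall _ hm, ?_, hnd⟩
          intro hm
          obtain ⟨kv2, hkv2, hv⟩ := List.mem_map.mp hm
          have := hany kv2 hkv2
          rw [eq_singleton_of_length_one kv2.2 (hall _ hkv2)] at this
          have hne : v.headD 0 ≠ kv2.2.headD 0 := by simpa using this
          exact hne hv.symm
        · rintro ⟨hall, -, hnd⟩
          exact ⟨fun kv' hm => hall _ (Or.inr hm), hnd⟩
    · simp [pvBOk, h]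

-- ===== VERDICT (by name: the statement is the Claim_ definition above) =====
theorem isMathematicalFunction_spec : Claim_equal_isMathematicalFunction := by
  intro mapping _
  unfold Spec_isMathematicalFunction isMathematicalFunction isMathematicalFunction_alt
  by_cases he : mapping.isEmpty
  · simp [he]
  · simp only [he, Bool.false_eq_true, if_false, Bool.not_false, Bool.true_and]
    have hA := pvALoop1_iff mapping mapping
    have hB := pvBOk_iff mapping
    have h2 : pvALoop2 mapping PySem.Set.empty = true ↔
        (mapping.map (fun kv => kv.2.headD 0)).Nodup := by
      simpa [PySem.Set.empty] using pvALoop2_iff mapping PySem.Set.empty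
    rw [h2] at hA
    exact Bool.eq_iff_iff.mpr (hA.trans hB.symm)
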